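-- pv_equiv track=rewrite | github.com/leap0-dev/docs | scripts/generate-python-sdk-reference.py | normalize_arg_entries
-- ===== SOURCE A (Python) =====
-- def default_param_description(name: str) -> str:
--     defaults = {
--         "sandbox": "Sandbox ID or object.",
--         "path": "Path used by this operation.",
--         "path_to_project": "Project path inside the sandbox.",
--         "http_timeout": "Optional HTTP request timeout in seconds for this SDK call.",
--         "files": "Files used by this operation.",
--         "language_id": "Language identifier for the LSP operation.",
--         "uri": "Document URI.",
--         "text": "Full document text.",
--         "version": "Document version number.",
--         "line": "Zero-based line number.",
--         "character": "Zero-based character offset.",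
--         "remote": 'Remote name (default ``"origin"``).',
--         "branch": "Branch name.",
--         "set_upstream": "Set upstream tracking.",
--         "username": "Auth username.",
--         "password": "Auth password or token.",
--         "message": "Commit message.",
--         "author": "Author name.",
--         "email": "Author email.",
--         "allow_empty": "Allow creating an empty commit.",
--         "context_lines": "Number of context lines to include.",
--         "target": "Branch, tag, or commit to compare against.",
--         "create": "Create the branch if it does not exist.",
--         "name": "Name used by this operation.",
--         "max_count": "Maximum number of results to return.",
--         "start_timestamp": "Start timestamp filter.",
--         "end_timestamp": "End timestamp filter.",
--         "checkout": "Switch to the new branch immediately.",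
--         "base_branch": "Base branch or revision.",
--         "url": "Repository URL.",
--         "commit_id": "Specific commit to use for this operation.",
--         "depth": "Shallow clone depth.",
--         "branch_type": 'Filter by ``"local"``, ``"remote"``, or ``"all"``.',
--         "contains": "Only include branches containing this commit SHA.",
--         "not_contains": "Exclude branches containing this commit SHA.",
--         "rebase": "Rebase instead of merge.",
--     }
--     return defaults.get(name, "Parameter for this operation.")
--
-- def normalize_arg_entries(entries: list[str], parameters: list[str]) -> list[str]:
--     by_name: dict[str, str] = {}
--     for entry in entries:
--         name, _, description = entry.partition(":")
--         param_name = name.strip()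
--         if param_name not in parameters or param_name in by_name:
--             continue
--         by_name[param_name] = description.strip() or default_param_description(param_name)
--
--     normalized: list[str] = []
--     for param_name in parameters:
--         description = by_name.get(param_name, default_param_description(param_name))
--         normalized.append(f"{param_name}: {description}")
--     return normalized
-- ===== SOURCE B (Python) =====
-- def default_param_description(name: str) -> str:
--     defaults = {
--         "sandbox": "Sandbox ID or object.",
--         "path": "Path used by this operation.",
--         "path_to_project": "Project path inside the sandbox.",
--         "http_timeout": "Optional HTTP request timeout in seconds for this SDK call.",
--         "files": "Files used by this operation.",
--         "language_id": "Language identifier for the LSP operation.",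
--         "uri": "Document URI.",
--         "text": "Full document text.",
--         "version": "Document version number.",
--         "line": "Zero-based line number.",
--         "character": "Zero-based character offset.",
--         "remote": 'Remote name (default ``"origin"``).',
--         "branch": "Branch name.",
--         "set_upstream": "Set upstream tracking.",
--         "username": "Auth username.",
--         "password": "Auth password or token.",
--         "message": "Commit message.",
--         "author": "Author name.",
--         "email": "Author email.",
--         "allow_empty": "Allow creating an empty commit.",
--         "context_lines": "Number of context lines to include.",
--         "target": "Branch, tag, or commit to compare against.",
--         "create": "Create the branch if it does not exist.",
--         "name": "Name used by this operation.",
--         "max_count": "Maximum number of results to return.",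
--         "start_timestamp": "Start timestamp filter.",
--         "end_timestamp": "End timestamp filter.",
--         "checkout": "Switch to the new branch immediately.",
--         "base_branch": "Base branch or revision.",
--         "url": "Repository URL.",
--         "commit_id": "Specific commit to use for this operation.",
--         "depth": "Shallow clone depth.",
--         "branch_type": 'Filter by ``"local"``, ``"remote"``, or ``"all"``.',
--         "contains": "Only include branches containing this commit SHA.",
--         "not_contains": "Exclude branches containing this commit SHA.",
--         "rebase": "Rebase instead of merge.",
--     }
--     return defaults.get(name, "Parameter for this operation.")
--
--
-- def _describe(entries: list[str], param_name: str) -> str: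
--     # first entry whose name (before ':', stripped) is param_name; default if the
--     # description is empty or no entry matches
--     for entry in entries:
--         head, _, tail = entry.partition(":")
--         if head.strip() == param_name:
--             return tail.strip() or default_param_description(param_name)
--     return default_param_description(param_name)
--
--
-- def normalize_arg_entries(entries: list[str], parameters: list[str]) -> list[str]:
--     # No intermediate by_name index: each parameter scans entries directly.
--     return [f"{p}: {_describe(entries, p)}" for p in parameters]
-- ===== Notes on version B (the rewrite author's own statement) =====
-- stated objective: alternative
-- what changed: Drops the intermediate by_name dict entirely: B maps over parameters and for each one scans entries for the first entry whose stripped name matches, returning its stripped description or the default when empty/missing.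
import Mathlib
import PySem

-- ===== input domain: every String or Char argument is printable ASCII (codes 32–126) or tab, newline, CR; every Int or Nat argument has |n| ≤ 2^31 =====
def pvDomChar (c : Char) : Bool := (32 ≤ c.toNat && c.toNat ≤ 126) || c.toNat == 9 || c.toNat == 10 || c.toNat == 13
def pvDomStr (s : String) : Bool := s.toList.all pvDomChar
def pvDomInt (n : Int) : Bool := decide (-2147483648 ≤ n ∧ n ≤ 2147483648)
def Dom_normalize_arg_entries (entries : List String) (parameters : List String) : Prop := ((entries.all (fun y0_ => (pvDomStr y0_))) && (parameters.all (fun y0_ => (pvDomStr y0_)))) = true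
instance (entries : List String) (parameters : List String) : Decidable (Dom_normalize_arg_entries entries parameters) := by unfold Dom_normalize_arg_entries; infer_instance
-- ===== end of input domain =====

-- B removes A's by_name index entirely: it maps over parameters, scanning entries per parameter
-- for the first stripped-name match (alternative decomposition, same return value; no mutation).

-- shared module helper: the defaults table (same helper in both Python files)
def default_param_description (name : String) : String :=
  (PySem.Dict.ofList [
    ("sandbox", "Sandbox ID or object."),
    ("path", "Path used by this operation."),
    ("path_to_project", "Project path inside the sandbox."),
    ("http_timeout", "Optional HTTP request timeout in seconds for this SDK call."),
    ("files", "Files used by this operation."),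
    ("language_id", "Language identifier for the LSP operation."),
    ("uri", "Document URI."),
    ("text", "Full document text."),
    ("version", "Document version number."),
    ("line", "Zero-based line number."),
    ("character", "Zero-based character offset."),
    ("remote", "Remote name (default ``\"origin\"``)."),
    ("branch", "Branch name."),
    ("set_upstream", "Set upstream tracking."),
    ("username", "Auth username."),
    ("password", "Auth password or token."),
    ("message", "Commit message."),
    ("author", "Author name."),
    ("email", "Author email."),
    ("allow_empty", "Allow creating an empty commit."),
    ("context_lines", "Number of context lines to include."),
    ("target", "Branch, tag, or commit to compare against."),
    ("create", "Create the branch if it does not exist."),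
    ("name", "Name used by this operation."),
    ("max_count", "Maximum number of results to return."),
    ("start_timestamp", "Start timestamp filter."),
    ("end_timestamp", "End timestamp filter."),
    ("checkout", "Switch to the new branch immediately."),
    ("base_branch", "Base branch or revision."),
    ("url", "Repository URL."),
    ("commit_id", "Specific commit to use for this operation."),
    ("depth", "Shallow clone depth."),
    ("branch_type", "Filter by ``\"local\"``, ``\"remote\"``, or ``\"all\"``."),
    ("contains", "Only include branches containing this commit SHA."),
    ("not_contains", "Exclude branches containing this commit SHA."),
    ("rebase", "Rebase instead of merge.")
  ]).getD name "Parameter for this operation."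

-- ===== PORT A =====
-- A's entry.partition(":") without the (always-discarded) separator component; exact for the
-- single-char separator: (text before the first ':', text after it); no ':' gives rest = ""
def pvPartitionColon (s : String) : String × String :=
  (String.ofList (s.toList.takeWhile (· != ':')),
   String.ofList ((s.toList.dropWhile (· != ':')).drop 1))

-- f"{param_name}: {description}" (built on List Char so the kernel can reduce it)
def pvFmt (param_name description : String) : String :=
  String.ofList (param_name.toList ++ ':' :: ' ' :: description.toList)

def normalize_arg_entries (entries : List String) (parameters : List String) : List String :=
  let by_name : PySem.Dict String String := entries.foldl (fun d entry =>
    let nd := pvPartitionColon entry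
    let param_name := PySem.Str.strip nd.1
    if !(parameters.contains param_name) || d.contains param_name then d
    else d.insert param_name
      (if PySem.Str.strip nd.2 == "" then default_param_description param_name
       else PySem.Str.strip nd.2)) PySem.Dict.empty
  parameters.foldl (fun normalized param_name =>
    normalized ++ [pvFmt param_name (by_name.getD param_name (default_param_description param_name))]) []

-- ===== PORT B =====
-- B's entry.partition(":") head/tail, via span (exact: span p l = (takeWhile, dropWhile))
def pvHeadTail (entry : String) : String × String :=
  match entry.toList.span (fun c => c != ':') with
  | (hd, tl) => (String.ofList hd, String.ofList (tl.drop 1))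

-- B's _describe helper: the for-loop with early return over entries
def pvDescribe (entries : List String) (param_name : String) : String :=
  match entries with
  | [] => default_param_description param_name
  | entry :: rest =>
      match pvHeadTail entry with
      | (head, tail) =>
          if PySem.Str.strip head = param_name then
            if PySem.Str.strip tail = "" then default_param_description param_name
            else PySem.Str.strip tail
          else pvDescribe rest param_name

def normalize_arg_entries_alt (entries : List String) (parameters : List String) : List String :=
  parameters.map (fun p =>
    String.ofList (p.toList ++ ':' :: ' ' :: (pvDescribe entries p).toList))

-- ===== PRECONDITION & SPEC =====
def Spec_normalize_arg_entries (entries : List String) (parameters : List String) (out : List String) : Prop := out = normalize_arg_entries_alt entries parameters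
instance (entries : List String) (parameters : List String) (out : List String) : Decidable (Spec_normalize_arg_entries entries parameters out) := by unfold Spec_normalize_arg_entries; infer_instance

-- ===== CLAIM (what is proved, stated in full; the proofs are below) =====
def Claim_equal_normalize_arg_entries : Prop := ∀ (entries : List String) (parameters : List String), Dom_normalize_arg_entries entries parameters → Spec_normalize_arg_entries entries parameters (normalize_arg_entries entries parameters)

-- ===== LEMMAS AND PROOFS =====

lemma headTail_eq (entry : String) : pvHeadTail entry = pvPartitionColon entry := by
  simp [pvHeadTail, pvPartitionColon, List.span_eq_takeWhile_dropWhile]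

-- the value A's dict ends up holding for key p (as an Option), read off the entries list
def pvScanOpt (entries : List String) (p : String) : Option String :=
  match entries with
  | [] => none
  | entry :: rest =>
      let nd := pvPartitionColon entry
      if PySem.Str.strip nd.1 == p then
        some (if PySem.Str.strip nd.2 == "" then default_param_description p
              else PySem.Str.strip nd.2)
      else pvScanOpt rest p

lemma build_get? (parameters : List String) (p : String) (hp : parameters.contains p = true)
    (entries : List String) :
    ∀ d : PySem.Dict String String,
      (entries.foldl (fun d entry =>
        let nd := pvPartitionColon entry
        let param_name := PySem.Str.strip nd.1
        if !(parameters.contains param_name) || d.contains param_name then d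
        else d.insert param_name
          (if PySem.Str.strip nd.2 == "" then default_param_description param_name
           else PySem.Str.strip nd.2)) d).get? p
      = (d.get? p).or (pvScanOpt entries p) := by
  induction entries with
  | nil => intro d; simp [pvScanOpt]
  | cons entry rest ih =>
    intro d
    simp only [List.foldl_cons]
    rw [ih]
    by_cases hname : PySem.Str.strip (pvPartitionColon entry).1 = p
    · subst hname
      by_cases hc : d.contains (PySem.Str.strip (pvPartitionColon entry).1) = true
      · rw [if_pos (by rw [hp, hc]; rfl)]
        obtain ⟨v, hv⟩ : ∃ v, d.get? (PySem.Str.strip (pvPartitionColon entry).1) = some v := by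
          have := PySem.Dict.contains_eq_isSome_get? d (PySem.Str.strip (pvPartitionColon entry).1)
          rw [hc] at this
          exact Option.isSome_iff_exists.mp this.symm
        simp [pvScanOpt, hv]
      · simp only [Bool.not_eq_true] at hc
        rw [if_neg (by rw [hp, hc]; decide)]
        rw [PySem.Dict.get?_insert_self,
          (PySem.Dict.get?_eq_none_iff_contains d _).mpr hc]
        simp [pvScanOpt]
    · have hbeq : (PySem.Str.strip (pvPartitionColon entry).1 == p) = false := by
        simp [hname]
      by_cases hskip : (!(parameters.contains (PySem.Str.strip (pvPartitionColon entry).1))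
          || d.contains (PySem.Str.strip (pvPartitionColon entry).1)) = true
      · rw [if_pos hskip]
        simp [pvScanOpt, hbeq]
      · rw [if_neg hskip]
        rw [PySem.Dict.get?_insert_of_ne _ _ (fun h => hname h.symm)]
        simp [pvScanOpt, hbeq]

-- B's scan-with-default equals the Option view of A's stored value, defaulted
lemma describe_eq_scanOpt (entries : List String) (p : String) :
    pvDescribe entries p = (pvScanOpt entries p).getD (default_param_description p) := by
  induction entries with
  | nil => simp [pvDescribe, pvScanOpt]
  | cons entry rest ih =>
    by_cases h : PySem.Str.strip (pvPartitionColon entry).1 = p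
    · by_cases hd : PySem.Str.strip (pvPartitionColon entry).2 = ""
      · simp [pvDescribe, pvScanOpt, headTail_eq, h, hd]
      · simp [pvDescribe, pvScanOpt, headTail_eq, h, hd]
    · simp only [pvDescribe, pvScanOpt, headTail_eq, if_neg h]
      have hbeq : (PySem.Str.strip (pvPartitionColon entry).1 == p) = false := by simp [h]
      simp [hbeq, ih]

-- A's per-parameter value equals B's scan value (for p actually in parameters)
lemma value_eq (entries parameters : List String) (p : String)
    (hp : parameters.contains p = true) :
    ((entries.foldl (fun d entry =>
        let nd := pvPartitionColon entry
        let param_name := PySem.Str.strip nd.1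
        if !(parameters.contains param_name) || d.contains param_name then d
        else d.insert param_name
          (if PySem.Str.strip nd.2 == "" then default_param_description param_name
           else PySem.Str.strip nd.2)) PySem.Dict.empty).getD p (default_param_description p))
    = pvDescribe entries p := by
  rw [PySem.Dict.getD_eq_get?_getD, build_get? parameters p hp entries PySem.Dict.empty,
    describe_eq_scanOpt]
  simp [Option.or]

theorem main_eq (entries parameters : List String) :
    normalize_arg_entries entries parameters = normalize_arg_entries_alt entries parameters := by
  have h1 : normalize_arg_entries entries parameters
      = parameters.foldl (fun acc p =>
          acc ++ [String.ofList (p.toList ++ ':' :: ' ' :: (pvDescribe entries p).toList)]) [] := by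
    apply PySem.List.foldl_congr_mem
    intro acc p hmem
    have hp : parameters.contains p = true := by
      simpa using List.elem_iff.mpr hmem
    rw [value_eq entries parameters p hp]
    rfl
  rw [h1, PySem.List.foldl_append_singleton_eq_map]
  simp [normalize_arg_entries_alt]

-- ===== VERDICT (by name: the statement is the Claim_ definition above) =====
theorem normalize_arg_entries_spec : Claim_equal_normalize_arg_entries := by
  intro entries parameters _
  unfold Spec_normalize_arg_entries
  exact main_eq entries parameters
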